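-- pv_equiv track=rewrite | github.com/sc0rt/KattisProblems | diceCup.py | highProbOut
-- ===== SOURCE A (Python) =====
-- from collections import Counter
--
-- def highProbOut(die1, die2):
--     sums = []
--     max_keys = []
--
--     for i in range(1, die1 + 1):
--         for j in range(1, die2 + 1):
--             sums.append(i + j)
--
--     count = Counter(sums)
--
--     for k,v in count.items():
--         if v == max(count.values()):
--             max_keys.append(k)
--
--     return sorted(max_keys)
-- ===== SOURCE B (Python) =====
-- def highProbOut(die1, die2):
--     # closed form: sum s has count min(die1,die2,s-1,die1+die2+1-s); the max
--     # count is min(die1,die2), attained exactly for s in [min+1, max+1]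
--     if die1 < 1 or die2 < 1:
--         return []
--     lo = min(die1, die2)
--     hi = max(die1, die2)
--     return list(range(lo + 1, hi + 2))
-- ===== Notes on version B (the rewrite author's own statement) =====
-- stated objective: faster
-- what changed: Replaces the O(d1*d2) enumeration of all dice pairs plus a max-of-values rescan per key with the closed form: the most probable sums are exactly min+1..max+1, emitted directly as a range.
import Mathlib
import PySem

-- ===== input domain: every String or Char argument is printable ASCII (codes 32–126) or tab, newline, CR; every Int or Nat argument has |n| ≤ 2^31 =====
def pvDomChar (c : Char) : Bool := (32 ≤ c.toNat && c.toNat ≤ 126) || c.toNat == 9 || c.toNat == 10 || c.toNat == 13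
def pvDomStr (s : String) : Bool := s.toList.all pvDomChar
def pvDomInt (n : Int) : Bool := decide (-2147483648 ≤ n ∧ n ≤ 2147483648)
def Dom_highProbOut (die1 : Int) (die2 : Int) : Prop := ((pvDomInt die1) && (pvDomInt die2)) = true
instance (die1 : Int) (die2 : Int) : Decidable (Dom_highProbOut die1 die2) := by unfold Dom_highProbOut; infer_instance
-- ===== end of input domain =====

-- B replaces A's O(d1*d2) pair enumeration (plus a max-of-values rescan on every
-- key) with the closed form: the maximal-count sums are exactly min+1 .. max+1.

-- ===== PORT A =====
def highProbOut (die1 : Int) (die2 : Int) : List Int :=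
  let sums : List Int :=
    (PySem.List.pyRange 1 (die1 + 1)).foldl (fun acc i =>
      (PySem.List.pyRange 1 (die2 + 1)).foldl (fun acc2 j => acc2 ++ [i + j]) acc) []
  let count := PySem.Dict.counter sums
  let max_keys : List Int :=
    count.items.foldl (fun acc kv =>
      if some kv.2 = PySem.List.max? count.values (fun v => v) then acc ++ [kv.1] else acc) []
  PySem.List.sorted max_keys (fun x => x)

-- ===== PORT B =====
def highProbOut_alt (die1 : Int) (die2 : Int) : List Int :=
  if die1 < 1 ∨ die2 < 1 then []
  else PySem.List.pyRange (min die1 die2 + 1) (max die1 die2 + 2)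

-- ===== PRECONDITION & SPEC =====
def Spec_highProbOut (die1 : Int) (die2 : Int) (out : List Int) : Prop := out = highProbOut_alt die1 die2
instance (die1 : Int) (die2 : Int) (out : List Int) : Decidable (Spec_highProbOut die1 die2 out) := by unfold Spec_highProbOut; infer_instance

-- ===== CLAIM (what is proved, stated in full; the proofs are below) =====
def Claim_equal_highProbOut : Prop := ∀ (die1 : Int) (die2 : Int), Dom_highProbOut die1 die2 → Spec_highProbOut die1 die2 (highProbOut die1 die2)

-- ===== LEMMAS AND PROOFS =====

-- A's nested append loop builds the flat list of all pairwise sums.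
theorem pvSums_eq (d1 d2 : Int) :
    (PySem.List.pyRange 1 (d1 + 1)).foldl (fun acc i =>
      (PySem.List.pyRange 1 (d2 + 1)).foldl (fun acc2 j => acc2 ++ [i + j]) acc) []
    = (PySem.List.pyRange 1 (d1 + 1)).flatMap
        (fun i => (PySem.List.pyRange 1 (d2 + 1)).map (fun j => i + j)) := by
  simp only [PySem.List.foldl_append_singleton_eq_map, PySem.List.foldl_append_eq_flatMap,
    List.nil_append]

theorem pvCount_pyRange (a b x : Int) :
    List.count x (PySem.List.pyRange a b) = if a ≤ x ∧ x < b then 1 else 0 := by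
  by_cases h : a ≤ x ∧ x < b
  · rw [if_pos h]
    exact List.count_eq_one_of_mem (PySem.List.nodup_pyRange_one a b)
      (PySem.List.mem_pyRange_one.mpr h)
  · rw [if_neg h]
    exact List.count_eq_zero.mpr (fun hm => h (PySem.List.mem_pyRange_one.mp hm))

-- number of integers of [a, b) lying in [c, d)
theorem pvCountP_pyRange_interval (c d a b : Int) :
    ((PySem.List.pyRange a b).countP (fun i => decide (c ≤ i ∧ i < d)) : Int)
      = max 0 (min b d - max a c) := by
  by_cases h : a < b
  · rw [PySem.List.pyRange_one_cons h, List.countP_cons]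
    have ih := pvCountP_pyRange_interval c d (a + 1) b
    simp only [decide_eq_true_eq]
    by_cases hp : c ≤ a ∧ a < d
    · rw [if_pos hp]
      push_cast
      omega
    · rw [if_neg hp]
      push_cast
      omega
  · rw [PySem.List.pyRange_one_eq_nil (by omega)]
    simp only [List.countP_nil, Nat.cast_zero]
    omega
termination_by (b - a).toNat
decreasing_by omega

-- the number of (i, j) with 1 ≤ i ≤ d1, 1 ≤ j ≤ d2, i + j = s, in closed form
theorem pvCount_sums (d1 d2 s : Int) :
    ((((PySem.List.pyRange 1 (d1 + 1)).flatMap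
        (fun i => (PySem.List.pyRange 1 (d2 + 1)).map (fun j => i + j))).count s : Int))
      = max 0 (min (d1 + 1) s - max 1 (s - d2)) := by
  rw [List.count_flatMap]
  have h1 : ((PySem.List.pyRange 1 (d1 + 1)).map
      (List.count s ∘ fun i => (PySem.List.pyRange 1 (d2 + 1)).map (fun j => i + j)))
      = (PySem.List.pyRange 1 (d1 + 1)).map
          (fun i => if (fun i => decide (s - d2 ≤ i ∧ i < s)) i then 1 else 0) := by
    apply List.map_congr_left
    intro i _
    have hinj : Function.Injective (fun j : Int => i + j) := fun x y hxy => by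
      simpa using hxy
    have hc := List.count_map_of_injective (PySem.List.pyRange 1 (d2 + 1))
      (fun j => i + j) hinj (s - i)
    have hs : i + (s - i) = s := by ring
    simp only [hs] at hc
    simp only [Function.comp_apply, hc, pvCount_pyRange]
    by_cases hp : 1 ≤ s - i ∧ s - i < d2 + 1
    · rw [if_pos hp, if_pos (by simp; omega)]
    · rw [if_neg hp, if_neg (by simp; omega)]
  rw [h1]
  have h3 : ∀ (l : List Int), (l.map
      (fun i => if (fun i => decide (s - d2 ≤ i ∧ i < s)) i then (1 : Nat) else 0)).sum
      = l.countP (fun i => decide (s - d2 ≤ i ∧ i < s)) := by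
    intro l
    induction l with
    | nil => rfl
    | cons a t ih =>
      simp only [List.map_cons, List.sum_cons, List.countP_cons, ih]
      by_cases hp : s - d2 ≤ a ∧ a < s <;> simp [hp] <;> omega
  rw [h3]
  exact pvCountP_pyRange_interval (s - d2) s 1 (d1 + 1)

theorem pvMem_sums (d1 d2 s : Int) (h1 : 1 ≤ d1) (h2 : 1 ≤ d2) :
    s ∈ (PySem.List.pyRange 1 (d1 + 1)).flatMap
        (fun i => (PySem.List.pyRange 1 (d2 + 1)).map (fun j => i + j))
      ↔ 2 ≤ s ∧ s ≤ d1 + d2 := by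
  rw [← List.count_pos_iff]
  have := pvCount_sums d1 d2 s
  omega

-- the largest multiplicity among the counter's values is min d1 d2
theorem pvMaxVal (d1 d2 : Int) (h1 : 1 ≤ d1) (h2 : 1 ≤ d2) :
    PySem.List.max?
      (PySem.Dict.counter ((PySem.List.pyRange 1 (d1 + 1)).flatMap
        (fun i => (PySem.List.pyRange 1 (d2 + 1)).map (fun j => i + j)))).values
      (fun v => v) = some (min d1 d2) := by
  set sums := (PySem.List.pyRange 1 (d1 + 1)).flatMap
      (fun i => (PySem.List.pyRange 1 (d2 + 1)).map (fun j => i + j)) with hsums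
  have hvals : (PySem.Dict.counter sums).values
      = (PySem.Set.ofList sums).map (fun k => ((sums.count k : Int))) := by
    simp only [PySem.Dict.values, PySem.Dict.items_counter, List.map_map]
    rfl
  have hmem : (min d1 d2 + 1) ∈ sums := by
    rw [hsums, pvMem_sums d1 d2 _ h1 h2]; omega
  have hcnt : ((sums.count (min d1 d2 + 1) : Int)) = min d1 d2 := by
    rw [hsums, pvCount_sums]; omega
  have hmv : (min d1 d2) ∈ (PySem.Dict.counter sums).values := by
    rw [hvals]
    exact List.mem_map.mpr ⟨min d1 d2 + 1, (PySem.Set.mem_ofList _ _).mpr hmem, hcnt⟩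
  have hub : ∀ v ∈ (PySem.Dict.counter sums).values, v ≤ min d1 d2 := by
    rw [hvals]
    intro v hv
    rcases List.mem_map.mp hv with ⟨k, _, rfl⟩
    have := pvCount_sums d1 d2 k
    rw [← hsums] at this
    omega
  cases hr : PySem.List.max? (PySem.Dict.counter sums).values (fun v => v) with
  | none =>
    rw [PySem.List.max?_eq_none_iff] at hr
    rw [hr] at hmv
    exact absurd hmv (List.not_mem_nil)
  | some v0 =>
    have h01 : v0 ≤ min d1 d2 := hub v0 (PySem.List.max?_mem hr)
    have h02 : min d1 d2 ≤ v0 := PySem.List.max?_isMax hr _ hmv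
    have : v0 = min d1 d2 := le_antisymm h01 h02
    rw [this]

-- the main case: both dice have at least one face
theorem pvMain (d1 d2 : Int) (h1 : 1 ≤ d1) (h2 : 1 ≤ d2) :
    highProbOut d1 d2 = PySem.List.pyRange (min d1 d2 + 1) (max d1 d2 + 2) := by
  simp only [highProbOut]
  rw [pvSums_eq, pvMaxVal d1 d2 h1 h2]
  rw [PySem.List.foldl_append_ite
      (fun kv : Int × Int => some kv.2 = some (min d1 d2)) (fun kv => kv.1)]
  rw [PySem.Dict.items_counter]
  simp only [List.filter_map, List.map_map, Function.comp_def, List.nil_append, List.map_id']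
  apply PySem.List.sorted_eq_of_perm_of_pairwise_lt
  · rw [List.perm_ext_iff_of_nodup (PySem.List.nodup_pyRange_one _ _)
      (List.Nodup.filter _ (PySem.Set.nodup_ofList _))]
    intro x
    have hm := pvMem_sums d1 d2 x h1 h2
    have hc := pvCount_sums d1 d2 x
    simp only [PySem.List.mem_pyRange_one, List.mem_filter, PySem.Set.mem_ofList,
      decide_eq_true_eq, Option.some.injEq, hm]
    omega
  · exact PySem.List.pairwise_lt_pyRange_one _ _

-- degenerate dice: no pair is generated, A returns []
theorem pvEmpty (d1 d2 : Int) (h : d1 < 1 ∨ d2 < 1) : highProbOut d1 d2 = [] := by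
  have hs : (PySem.List.pyRange 1 (d1 + 1)).foldl (fun acc i =>
      (PySem.List.pyRange 1 (d2 + 1)).foldl (fun acc2 j => acc2 ++ [i + j]) acc) []
      = ([] : List Int) := by
    rw [pvSums_eq]
    rcases h with h | h
    · rw [PySem.List.pyRange_one_eq_nil (by omega : d1 + 1 ≤ 1)]
      rfl
    · rw [PySem.List.pyRange_one_eq_nil (by omega : d2 + 1 ≤ 1)]
      simp
  simp only [highProbOut, hs]
  rfl

-- ===== VERDICT (by name: the statement is the Claim_ definition above) =====
theorem highProbOut_spec : Claim_equal_highProbOut := by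
  intro d1 d2 _
  unfold Spec_highProbOut highProbOut_alt
  by_cases h : d1 < 1 ∨ d2 < 1
  · rw [if_pos h]
    exact pvEmpty d1 d2 h
  · rw [if_neg h]
    exact pvMain d1 d2 (by omega) (by omega)
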